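-- pv_equiv track=rewrite | github.com/Snooker-Tracker/warping-test | tracking.py | _match_tracks_to_detections
-- ===== SOURCE A (Python) =====
-- import math
--
-- def _match_tracks_to_detections(predictions, detections, gating_distance):
--     if not predictions:
--         return [], [], list(range(len(detections)))
--     if not detections:
--         return [], list(predictions.keys()), []
--
--     pairs = []
--     for track_id, (pred_x, pred_y) in predictions.items():
--         for det_idx, det in enumerate(detections):
--             dist = math.hypot(det["x"] - pred_x, det["y"] - pred_y)
--             pairs.append((dist, track_id, det_idx))
--     pairs.sort(key=lambda item: item[0])
--
--     used_tracks = set()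
--     used_dets = set()
--     matches = []
--     for dist, track_id, det_idx in pairs:
--         if track_id in used_tracks or det_idx in used_dets:
--             continue
--         if gating_distance is not None and dist > gating_distance:
--             continue
--         used_tracks.add(track_id)
--         used_dets.add(det_idx)
--         matches.append((track_id, det_idx))
--
--     unmatched_tracks = [
--         track_id for track_id in predictions if track_id not in used_tracks
--     ]
--     unmatched_dets = [
--         det_idx for det_idx in range(len(detections)) if det_idx not in used_dets
--     ]
--     return matches, unmatched_tracks, unmatched_dets
-- ===== SOURCE B (Python) =====
-- import math
--
-- def _match_tracks_to_detections(predictions, detections, gating_distance):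
--     used_tracks = set()
--     used_dets = set()
--     matches = []
--     while True:
--         # scan all unused (track, detection) pairs and keep the closest feasible
--         # one; ties go to the earliest pair in track-then-detection order
--         best = None  # (distance, track_id, det_idx)
--         for track_id, (pred_x, pred_y) in predictions.items():
--             if track_id in used_tracks:
--                 continue
--             for det_idx, det in enumerate(detections):
--                 if det_idx in used_dets:
--                     continue
--                 dist = math.hypot(det["x"] - pred_x, det["y"] - pred_y)
--                 if gating_distance is not None and dist > gating_distance:
--                     continue
--                 if best is None or dist < best[0]:
--                     best = (dist, track_id, det_idx)
--         if best is None: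
--             break
--         _, track_id, det_idx = best
--         used_tracks.add(track_id)
--         used_dets.add(det_idx)
--         matches.append((track_id, det_idx))
--     unmatched_tracks = [t for t in predictions if t not in used_tracks]
--     unmatched_dets = [d for d in range(len(detections)) if d not in used_dets]
--     return matches, unmatched_tracks, unmatched_dets
-- ===== Notes on version B (the rewrite author's own statement) =====
-- stated objective: alternative
-- what changed: B drops A's build-all-pairs + stable-sort + single greedy pass and instead repeatedly scans the still-unused track/detection pairs for the closest feasible candidate (earliest pair wins ties), committing one match per scan; Pre_ excludes only inputs where both lists are nonempty and a detection dict lacks key 'x' or 'y', on which A raises KeyError (B raises there too).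
import Mathlib
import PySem

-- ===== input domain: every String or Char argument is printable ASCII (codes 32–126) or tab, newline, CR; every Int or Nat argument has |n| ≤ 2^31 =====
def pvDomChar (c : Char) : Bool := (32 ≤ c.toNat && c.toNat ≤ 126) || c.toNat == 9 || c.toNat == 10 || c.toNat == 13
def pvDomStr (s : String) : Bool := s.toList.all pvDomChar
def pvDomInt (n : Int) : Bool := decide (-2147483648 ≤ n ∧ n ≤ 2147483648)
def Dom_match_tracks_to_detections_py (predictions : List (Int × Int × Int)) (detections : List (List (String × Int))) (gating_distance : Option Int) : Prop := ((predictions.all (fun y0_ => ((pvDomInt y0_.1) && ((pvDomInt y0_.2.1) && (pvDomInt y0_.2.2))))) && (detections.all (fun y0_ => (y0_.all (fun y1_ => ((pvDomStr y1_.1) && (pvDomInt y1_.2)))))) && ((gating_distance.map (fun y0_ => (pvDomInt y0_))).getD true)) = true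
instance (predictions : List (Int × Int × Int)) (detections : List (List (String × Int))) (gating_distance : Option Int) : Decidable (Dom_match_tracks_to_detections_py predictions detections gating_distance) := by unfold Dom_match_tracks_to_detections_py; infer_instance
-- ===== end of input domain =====

-- B replaces A's build-all-pairs + stable-sort + one greedy pass by repeated closest-
-- pair selection scans over the still-unused track×detection pairs (no sort). Both
-- Pythons call math.hypot; in BOTH ports that distance is represented by its exact
-- integer square (real sqrt is strictly monotone and nonnegative, so every ordering
-- and gating comparison is the same) — this hand-ported spot is exact on integers.

-- ===== PORT A =====
-- det["x"] on the association-list encoding of a detection dict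
def pvDet (det : List (String × Int)) (k : String) : Int :=
  PySem.Dict.getD (PySem.Dict.ofList det) k 0

-- `dist > gating_distance` for dist = sqrt s (s the squared distance), in exact integers
def pvGateSkip (g : Option Int) (s : Int) : Bool :=
  match g with
  | none => false
  | some gd => decide (gd < 0) || decide (gd * gd < s)

-- the `pairs` list: (squared distance, track_id, det_idx), track-major generation order
def pvPairsA (predictions : List (Int × Int × Int)) (detections : List (List (String × Int))) : List (Int × Int × Int) :=
  predictions.foldl (fun pairs t =>
    pairs ++ (PySem.List.enumerate detections).map (fun d =>
      let dx := (pvDet d.2 "x") - t.2.1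
      let dy := (pvDet d.2 "y") - t.2.2
      (dx * dx + dy * dy, t.1, d.1))) []

-- one step of A's greedy loop over the sorted pairs; state = (used_tracks, used_dets, matches)
def pvStepA (g : Option Int) (st : PySem.Set Int × PySem.Set Int × List (Int × Int)) (p : Int × Int × Int) : PySem.Set Int × PySem.Set Int × List (Int × Int) :=
  if PySem.Set.contains st.1 p.2.1 || PySem.Set.contains st.2.1 p.2.2 then st
  else if pvGateSkip g p.1 then st
  else (PySem.Set.add st.1 p.2.1, PySem.Set.add st.2.1 p.2.2, st.2.2 ++ [(p.2.1, p.2.2)])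

def match_tracks_to_detections_py (predictions : List (Int × Int × Int)) (detections : List (List (String × Int))) (gating_distance : Option Int) : (List (Int × Int)) × List Int × List Int :=
  if predictions = [] then ([], [], PySem.List.pyRange 0 detections.length 1)
  else if detections = [] then ([], predictions.map (·.1), [])
  else
    let pairs := PySem.List.sorted (pvPairsA predictions detections) (fun p => p.1)
    let st := pairs.foldl (pvStepA gating_distance) ([], [], [])
    (st.2.2,
     (predictions.map (·.1)).filter (fun t => !(PySem.Set.contains st.1 t)),
     (PySem.List.pyRange 0 detections.length 1).filter (fun d => !(PySem.Set.contains st.2.1 d)))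

-- ===== PORT B =====
-- inner scan of Source B: fold the detections, keeping the best (strictly closer) candidate
def pvScanDetsB (g : Option Int) (uD : PySem.Set Int) (detections : List (List (String × Int))) (t : Int × Int × Int) (best : Option (Int × Int × Int)) : Option (Int × Int × Int) :=
  (PySem.List.enumerate detections).foldl (fun b d =>
    if PySem.Set.contains uD d.1 then b
    else
      let dx := (pvDet d.2 "x") - t.2.1
      let dy := (pvDet d.2 "y") - t.2.2
      let s := dx * dx + dy * dy
      if pvGateSkip g s then b
      else
        match b with
        | none => some (s, t.1, d.1)
        | some bb => if s < bb.1 then some (s, t.1, d.1) else b) best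

-- one full scan of Source B's while-body: the closest feasible unused pair, earliest first
def pvBestB (g : Option Int) (predictions : List (Int × Int × Int)) (detections : List (List (String × Int))) (uT uD : PySem.Set Int) : Option (Int × Int × Int) :=
  predictions.foldl (fun b t => if PySem.Set.contains uT t.1 then b else pvScanDetsB g uD detections t b) none

-- Source B's 'while True': each iteration marks a previously unused track id used, so it
-- ends within predictions.length iterations — that is the fuel
def pvLoopB (g : Option Int) (predictions : List (Int × Int × Int)) (detections : List (List (String × Int))) : Nat → PySem.Set Int × PySem.Set Int × List (Int × Int) → PySem.Set Int × PySem.Set Int × List (Int × Int)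
  | 0, st => st
  | fuel + 1, st =>
    match pvBestB g predictions detections st.1 st.2.1 with
    | none => st
    | some p => pvLoopB g predictions detections fuel (PySem.Set.add st.1 p.2.1, PySem.Set.add st.2.1 p.2.2, st.2.2 ++ [(p.2.1, p.2.2)])

def match_tracks_to_detections_py_alt (predictions : List (Int × Int × Int)) (detections : List (List (String × Int))) (gating_distance : Option Int) : (List (Int × Int)) × List Int × List Int :=
  let st := pvLoopB gating_distance predictions detections predictions.length ([], [], [])
  (st.2.2,
   (predictions.map (·.1)).filter (fun t => !(PySem.Set.contains st.1 t)),
   (PySem.List.pyRange 0 detections.length 1).filter (fun d => !(PySem.Set.contains st.2.1 d)))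

-- ===== PRECONDITION & SPEC =====
-- Pre_ excludes exactly the inputs on which A raises KeyError: both lists nonempty while
-- some detection dict lacks key "x" or "y" (B raises there too).
def Pre_match_tracks_to_detections_py (predictions : List (Int × Int × Int)) (detections : List (List (String × Int))) (_gating_distance : Option Int) : Prop :=
  predictions = [] ∨ detections = [] ∨
    ∀ det ∈ detections, (PySem.Dict.get? (PySem.Dict.ofList det) "x").isSome ∧ (PySem.Dict.get? (PySem.Dict.ofList det) "y").isSome
instance (predictions : List (Int × Int × Int)) (detections : List (List (String × Int))) (gating_distance : Option Int) : Decidable (Pre_match_tracks_to_detections_py predictions detections gating_distance) := by unfold Pre_match_tracks_to_detections_py; infer_instance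

def pvWitness_match_tracks_to_detections_py : (List (Int × Int × Int)) × (List (List (String × Int))) × Option Int :=
  ([(1, 0, 0), (2, 3, 4)], [[("x", 1), ("y", 0)], [("x", 3), ("y", 5)]], some 5)

def Spec_match_tracks_to_detections_py (predictions : List (Int × Int × Int)) (detections : List (List (String × Int))) (gating_distance : Option Int) (out : (List (Int × Int)) × List Int × List Int) : Prop := out = match_tracks_to_detections_py_alt predictions detections gating_distance
instance (predictions : List (Int × Int × Int)) (detections : List (List (String × Int))) (gating_distance : Option Int) (out : (List (Int × Int)) × List Int × List Int) : Decidable (Spec_match_tracks_to_detections_py predictions detections gating_distance out) := by unfold Spec_match_tracks_to_detections_py; infer_instance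

-- ===== CLAIM (what is proved, stated in full; the proofs are below) =====
def Claim_equal_match_tracks_to_detections_py : Prop := ∀ (predictions : List (Int × Int × Int)) (detections : List (List (String × Int))) (gating_distance : Option Int), Dom_match_tracks_to_detections_py predictions detections gating_distance → Pre_match_tracks_to_detections_py predictions detections gating_distance → Spec_match_tracks_to_detections_py predictions detections gating_distance (match_tracks_to_detections_py predictions detections gating_distance)

-- ===== LEMMAS AND PROOFS =====

-- admissibility of a pair (s, tid, didx) under the used sets and the gate
def pvAdm (g : Option Int) (uT uD : PySem.Set Int) (p : Int × Int × Int) : Bool :=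
  !PySem.Set.contains uT p.2.1 && !PySem.Set.contains uD p.2.2 && !pvGateSkip g p.1

-- generic "keep the strictly better candidate" combiner (the body of B's scan)
def pvCmb (adm : Int × Int × Int → Bool) (b : Option (Int × Int × Int)) (p : Int × Int × Int) : Option (Int × Int × Int) :=
  if adm p then
    match b with
    | none => some p
    | some bb => if p.1 < bb.1 then some p else b
  else b

def pvCommit (st : PySem.Set Int × PySem.Set Int × List (Int × Int)) (p : Int × Int × Int) : PySem.Set Int × PySem.Set Int × List (Int × Int) :=
  (PySem.Set.add st.1 p.2.1, PySem.Set.add st.2.1 p.2.2, st.2.2 ++ [(p.2.1, p.2.2)])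

theorem pv_contains_add (s : PySem.Set Int) (x y : Int) :
    PySem.Set.contains (PySem.Set.add s x) y = (PySem.Set.contains s y || y == x) := by
  simp only [PySem.Set.add, PySem.Set.contains]
  split
  · rename_i h
    cases hy : y == x
    · simp
    · have hyx : y = x := by simpa using hy
      subst hyx
      simp only [List.contains_iff_mem] at h ⊢
      simp [h]
  · rw [List.contains_append]; congr 1; · simp; · cases hy : y == x <;> simp_all

theorem pv_step_eq (g : Option Int) (st : PySem.Set Int × PySem.Set Int × List (Int × Int)) (p : Int × Int × Int) :
    pvStepA g st p = if pvAdm g st.1 st.2.1 p then pvCommit st p else st := by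
  unfold pvStepA pvAdm pvCommit
  cases h1 : PySem.Set.contains st.1 p.2.1 <;> cases h2 : PySem.Set.contains st.2.1 p.2.2 <;>
    cases h3 : pvGateSkip g p.1 <;> simp

theorem pv_adm_mono (g : Option Int) (uT uD : PySem.Set Int) (q a b : Int × Int × Int)
    (h : pvAdm g (PySem.Set.add uT a.2.1) (PySem.Set.add uD b.2.2) q = true) :
    pvAdm g uT uD q = true := by
  unfold pvAdm at h ⊢
  rw [pv_contains_add, pv_contains_add] at h
  cases h1 : PySem.Set.contains uT q.2.1 <;> cases h2 : PySem.Set.contains uD q.2.2 <;>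
    cases h3 : pvGateSkip g q.1 <;> simp_all

theorem pv_foldl_skip (g : Option Int) (S : List (Int × Int × Int)) (st : PySem.Set Int × PySem.Set Int × List (Int × Int))
    (h : S.find? (pvAdm g st.1 st.2.1) = none) :
    S.foldl (pvStepA g) st = st := by
  induction S with
  | nil => rfl
  | cons q S ih =>
    rw [List.find?_cons] at h
    cases hq : pvAdm g st.1 st.2.1 q
    · rw [hq] at h
      simp only [List.foldl_cons, pv_step_eq, hq, if_neg Bool.false_ne_true]
      exact ih h
    · simp [hq] at h

theorem pv_foldl_restart (g : Option Int) (S : List (Int × Int × Int)) (st : PySem.Set Int × PySem.Set Int × List (Int × Int))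
    (p : Int × Int × Int) (h : S.find? (pvAdm g st.1 st.2.1) = some p) :
    S.foldl (pvStepA g) st = S.foldl (pvStepA g) (pvCommit st p) := by
  induction S with
  | nil => simp at h
  | cons q S ih =>
    rw [List.find?_cons] at h
    cases hq : pvAdm g st.1 st.2.1 q
    · rw [hq] at h
      have hq2 : pvAdm g (pvCommit st p).1 (pvCommit st p).2.1 q = false := by
        cases hc : pvAdm g (pvCommit st p).1 (pvCommit st p).2.1 q
        · rfl
        · have := pv_adm_mono g st.1 st.2.1 q p p hc
          rw [hq] at this; exact absurd this (by simp)
      simp only [List.foldl_cons, pv_step_eq, hq, hq2, if_neg Bool.false_ne_true]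
      exact ih h
    · rw [hq] at h
      have hpq : p = q := by simpa using h.symm
      subst hpq
      have hq2 : pvAdm g (pvCommit st p).1 (pvCommit st p).2.1 p = false := by
        unfold pvAdm pvCommit
        rw [pv_contains_add]
        simp
      simp only [List.foldl_cons, pv_step_eq, hq, hq2, if_true, if_neg Bool.false_ne_true]

-- find-first on a stable insertion = "keep the strictly better candidate" update
theorem pv_find_insertBy (adm : Int × Int × Int → Bool) (S : List (Int × Int × Int)) (x : Int × Int × Int)
    (hs : S.Pairwise (fun a b => a.1 ≤ b.1)) :
    (PySem.List.insertBy (fun a b => decide (a.1 < b.1)) x S).find? adm = pvCmb adm (S.find? adm) x := by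
  induction S with
  | nil =>
    cases hx : adm x <;> simp [PySem.List.insertBy, pvCmb, List.find?, hx]
  | cons y S ih =>
    rw [List.pairwise_cons] at hs
    show ((if decide (x.1 < y.1) = true then x :: y :: S else
        y :: PySem.List.insertBy (fun a b => decide (a.1 < b.1)) x S).find? adm) = _
    cases hlt : decide (x.1 < y.1)
    · -- y.1 ≤ x.1 : x is inserted further right, y stays in front
      have hxy : ¬ x.1 < y.1 := by simpa using hlt
      cases hy : adm y
      · simp only [Bool.false_eq_true, if_false, List.find?_cons, hy]
        exact ih hs.2
      · simp [hy, pvCmb, hxy]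
    · -- x.1 < y.1 : x lands in front of y
      have hxlt : x.1 < y.1 := by simpa using hlt
      simp only [if_true]
      cases hx : adm x
      · simp [List.find?_cons, hx, pvCmb]
      · cases hf : (y :: S).find? adm with
        | none => simp [hx, pvCmb]
        | some p =>
          have hp : p ∈ y :: S := List.mem_of_find?_eq_some hf
          have hyp : y.1 ≤ p.1 := by
            rcases List.mem_cons.mp hp with h1 | h2
            · rw [h1]
            · exact hs.1 p h2
          have hxp : x.1 < p.1 := lt_of_lt_of_le hxlt hyp
          simp [hx, pvCmb, hxp]

-- find-first over the stable sort = B's single min-selection scan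
theorem pv_find_sorted (adm : Int × Int × Int → Bool) (P : List (Int × Int × Int)) :
    (PySem.List.sorted P (fun p => p.1)).find? adm = P.foldl (pvCmb adm) none := by
  induction P using List.reverseRecOn with
  | nil => rfl
  | append_singleton P x ih =>
    have hins : PySem.List.sorted (P ++ [x]) (fun p => p.1)
        = PySem.List.insertBy (fun a b => decide (a.1 < b.1)) x (PySem.List.sorted P (fun p => p.1)) := by
      rw [PySem.List.sorted_eq_foldl_insertBy, PySem.List.sorted_eq_foldl_insertBy, List.foldl_append]
      rfl
    rw [hins, pv_find_insertBy adm _ x (PySem.List.sorted_pairwise P (fun p => p.1)), ih,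
      List.foldl_append]
    rfl

-- flatten B's two nested scans into one fold over the pair list
theorem pv_foldl_cmb_flatMap {α : Type} (adm : Int × Int × Int → Bool) (f : α → List (Int × Int × Int)) (l : List α) (b : Option (Int × Int × Int)) :
    l.foldl (fun b t => (f t).foldl (pvCmb adm) b) b = (l.flatMap f).foldl (pvCmb adm) b := by
  induction l generalizing b with
  | nil => rfl
  | cons t l ih => rw [List.foldl_cons, List.flatMap_cons, List.foldl_append, ih]

def pvBlock (detections : List (List (String × Int))) (t : Int × Int × Int) : List (Int × Int × Int) :=
  (PySem.List.enumerate detections).map (fun d =>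
    let dx := (pvDet d.2 "x") - t.2.1
    let dy := (pvDet d.2 "y") - t.2.2
    (dx * dx + dy * dy, t.1, d.1))

theorem pv_pairsA_eq (predictions : List (Int × Int × Int)) (detections : List (List (String × Int))) :
    pvPairsA predictions detections = predictions.flatMap (pvBlock detections) := by
  unfold pvPairsA pvBlock
  rw [PySem.List.foldl_append_eq_flatMap]
  rfl

theorem pv_foldl_cmb_of_not_adm (adm : Int × Int × Int → Bool) (l : List (Int × Int × Int)) (b : Option (Int × Int × Int))
    (h : ∀ p ∈ l, adm p = false) : l.foldl (pvCmb adm) b = b := by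
  induction l generalizing b with
  | nil => rfl
  | cons p l ih =>
    rw [List.foldl_cons]
    have hp := h p (List.mem_cons_self ..)
    rw [show pvCmb adm b p = b by unfold pvCmb; rw [hp]; simp]
    exact ih _ (fun q hq => h q (List.mem_cons_of_mem _ hq))

theorem pv_scan_eq (g : Option Int) (uT uD : PySem.Set Int) (detections : List (List (String × Int)))
    (t : Int × Int × Int) (b : Option (Int × Int × Int)) :
    (if PySem.Set.contains uT t.1 then b else pvScanDetsB g uD detections t b)
      = (pvBlock detections t).foldl (pvCmb (pvAdm g uT uD)) b := by
  cases hT : PySem.Set.contains uT t.1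
  · simp only [Bool.false_eq_true, if_false]
    unfold pvScanDetsB pvBlock
    rw [List.foldl_map]
    induction (PySem.List.enumerate detections) generalizing b with
    | nil => rfl
    | cons d l ih =>
      rw [List.foldl_cons, List.foldl_cons, ih]
      congr 1
      simp only [pvCmb, pvAdm, hT]
      cases hD : PySem.Set.contains uD d.1 <;> cases hG : pvGateSkip g ((pvDet d.2 "x" - t.2.1) * (pvDet d.2 "x" - t.2.1) + (pvDet d.2 "y" - t.2.2) * (pvDet d.2 "y" - t.2.2)) <;>
        simp
  · simp only [if_true]
    refine (pv_foldl_cmb_of_not_adm _ _ _ ?_).symm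
    intro p hp
    unfold pvBlock at hp
    obtain ⟨d, _, hd⟩ := List.mem_map.mp hp
    have : p.2.1 = t.1 := by rw [← hd]
    unfold pvAdm
    rw [this, hT]
    simp

theorem pv_best_eq (g : Option Int) (predictions : List (Int × Int × Int)) (detections : List (List (String × Int)))
    (uT uD : PySem.Set Int) :
    pvBestB g predictions detections uT uD = (pvPairsA predictions detections).foldl (pvCmb (pvAdm g uT uD)) none := by
  unfold pvBestB
  rw [pv_pairsA_eq, ← pv_foldl_cmb_flatMap]
  congr 1
  funext b t
  exact pv_scan_eq g uT uD detections t b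

theorem pv_selmin_some (adm : Int × Int × Int → Bool) (P : List (Int × Int × Int)) (b : Option (Int × Int × Int))
    (p : Int × Int × Int) (h : P.foldl (pvCmb adm) b = some p) :
    (p ∈ P ∧ adm p = true) ∨ b = some p := by
  induction P generalizing b with
  | nil => exact Or.inr h
  | cons q P ih =>
    rw [List.foldl_cons] at h
    rcases ih _ h with ⟨hm, ha⟩ | hb
    · exact Or.inl ⟨List.mem_cons_of_mem _ hm, ha⟩
    · unfold pvCmb at hb
      cases hq : adm q
      · rw [hq] at hb
        simp only [Bool.false_eq_true, if_false] at hb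
        exact Or.inr hb
      · rw [hq] at hb
        simp only [if_true] at hb
        cases b with
        | none =>
          have : q = p := by simpa using hb
          exact Or.inl ⟨this ▸ List.mem_cons_self .., this ▸ hq⟩
        | some bb =>
          have hb' : (if q.1 < bb.1 then some q else some bb) = some p := hb
          by_cases hlt : q.1 < bb.1
          · rw [if_pos hlt] at hb'
            have : q = p := by simpa using hb'
            exact Or.inl ⟨this ▸ List.mem_cons_self .., this ▸ hq⟩
          · rw [if_neg hlt] at hb'
            exact Or.inr hb'

theorem pv_mem_pairs (predictions : List (Int × Int × Int)) (detections : List (List (String × Int)))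
    (p : Int × Int × Int) (h : p ∈ pvPairsA predictions detections) :
    ∃ t ∈ predictions, p.2.1 = t.1 := by
  rw [pv_pairsA_eq] at h
  obtain ⟨t, ht, hp⟩ := List.mem_flatMap.mp h
  refine ⟨t, ht, ?_⟩
  unfold pvBlock at hp
  obtain ⟨d, _, hd⟩ := List.mem_map.mp hp
  rw [← hd]

def pvMu (predictions : List (Int × Int × Int)) (uT : PySem.Set Int) : Nat :=
  (predictions.filter (fun t => !PySem.Set.contains uT t.1)).length

theorem pv_mu_pos (predictions : List (Int × Int × Int)) (uT : PySem.Set Int) (t0 : Int × Int × Int)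
    (hm : t0 ∈ predictions) (hc : PySem.Set.contains uT t0.1 = false) : 0 < pvMu predictions uT := by
  unfold pvMu
  exact List.length_pos_of_mem (List.mem_filter.mpr ⟨hm, by rw [hc]; rfl⟩)

theorem pv_filter_mono (l : List (Int × Int × Int)) (pn po : Int × Int × Int → Bool)
    (h : ∀ x, pn x = true → po x = true) : (l.filter pn).length ≤ (l.filter po).length := by
  induction l with
  | nil => exact le_rfl
  | cons a l ih =>
    rw [List.filter_cons, List.filter_cons]
    cases ha : pn a
    · cases po a <;> simp <;> omega
    · rw [h a ha]
      simpa using ih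

theorem pv_filter_dec (l : List (Int × Int × Int)) (pn po : Int × Int × Int → Bool)
    (hmono : ∀ x, pn x = true → po x = true) (t0 : Int × Int × Int) (hm : t0 ∈ l)
    (ho : po t0 = true) (hn : pn t0 = false) :
    (l.filter pn).length < (l.filter po).length := by
  induction l with
  | nil => cases hm
  | cons a l ih =>
    rw [List.filter_cons, List.filter_cons]
    rcases List.mem_cons.mp hm with ha | ha
    · subst ha
      rw [ho, hn]
      simpa using Nat.lt_succ_of_le (pv_filter_mono l pn po hmono)
    · cases han : pn a
      · cases hao : po a
        · simpa using ih ha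
        · exact Nat.lt_succ_of_lt (ih ha)
      · rw [hmono a han]
        simpa using ih ha

theorem pv_mu_dec (predictions : List (Int × Int × Int)) (uT : PySem.Set Int) (t0 : Int × Int × Int)
    (hm : t0 ∈ predictions) (hc : PySem.Set.contains uT t0.1 = false) :
    pvMu predictions (PySem.Set.add uT t0.1) < pvMu predictions uT := by
  unfold pvMu
  refine pv_filter_dec _ _ _ ?_ t0 hm (by rw [hc]; rfl) ?_
  · intro x hx
    rw [pv_contains_add] at hx
    cases hct : PySem.Set.contains uT x.1
    · rfl
    · rw [hct] at hx; simp at hx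
  · rw [pv_contains_add, hc]
    simp

theorem pv_main (g : Option Int) (predictions : List (Int × Int × Int)) (detections : List (List (String × Int)))
    (fuel : Nat) (st : PySem.Set Int × PySem.Set Int × List (Int × Int)) (hf : pvMu predictions st.1 ≤ fuel) :
    (PySem.List.sorted (pvPairsA predictions detections) (fun p => p.1)).foldl (pvStepA g) st
      = pvLoopB g predictions detections fuel st := by
  induction fuel generalizing st with
  | zero =>
    have hmu : pvMu predictions st.1 = 0 := Nat.le_zero.mp hf
    have hfind : (PySem.List.sorted (pvPairsA predictions detections) (fun p => p.1)).find?
        (pvAdm g st.1 st.2.1) = none := by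
      rw [List.find?_eq_none]
      intro p hp
      rw [PySem.List.mem_sorted] at hp
      obtain ⟨t, ht, hpt⟩ := pv_mem_pairs _ _ _ hp
      cases hcc : PySem.Set.contains st.1 p.2.1
      · exfalso
        have := pv_mu_pos predictions st.1 t ht (by rw [← hpt]; exact hcc)
        omega
      · unfold pvAdm
        rw [hcc]
        simp
    rw [pv_foldl_skip _ _ _ hfind]
    rfl
  | succ fuel ih =>
    cases hbest : pvBestB g predictions detections st.1 st.2.1 with
    | none =>
      have hfind : (PySem.List.sorted (pvPairsA predictions detections) (fun p => p.1)).find?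
          (pvAdm g st.1 st.2.1) = none := by
        rw [pv_find_sorted, ← pv_best_eq]
        exact hbest
      rw [pv_foldl_skip _ _ _ hfind]
      simp [pvLoopB, hbest]
    | some p =>
      have hsel : (pvPairsA predictions detections).foldl (pvCmb (pvAdm g st.1 st.2.1)) none = some p := by
        rw [← pv_best_eq]; exact hbest
      have hfind : (PySem.List.sorted (pvPairsA predictions detections) (fun p => p.1)).find?
          (pvAdm g st.1 st.2.1) = some p := by
        rw [pv_find_sorted]; exact hsel
      rcases pv_selmin_some _ _ _ _ hsel with ⟨hpmem, hadm⟩ | hnone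
      · obtain ⟨t, ht, hpt⟩ := pv_mem_pairs _ _ _ hpmem
        have hcont : PySem.Set.contains st.1 p.2.1 = false := by
          unfold pvAdm at hadm
          cases hcc : PySem.Set.contains st.1 p.2.1
          · rfl
          · rw [hcc] at hadm; simp at hadm
        rw [pv_foldl_restart _ _ _ _ hfind, ih (pvCommit st p) ?_]
        · simp only [pvLoopB, hbest]
          rfl
        · have hdec := pv_mu_dec predictions st.1 t ht (by rw [← hpt]; exact hcont)
          have : pvMu predictions (pvCommit st p).1 < pvMu predictions st.1 := by
            unfold pvCommit
            rw [hpt]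
            exact hdec
          omega
      · simp at hnone

theorem pv_filter_nil_set (l : List Int) :
    l.filter (fun d => !(PySem.Set.contains ([] : PySem.Set Int) d)) = l := by
  simp [PySem.Set.contains]

theorem pv_pairsA_nil_dets (predictions : List (Int × Int × Int)) :
    pvPairsA predictions [] = [] := by
  rw [pv_pairsA_eq]
  simp [pvBlock]

theorem pv_mu_nil (predictions : List (Int × Int × Int)) :
    pvMu predictions ([] : PySem.Set Int) = predictions.length := by
  unfold pvMu
  simp [PySem.Set.contains]

-- ===== VERDICT (by name: the statement is the Claim_ definition above) =====
theorem match_tracks_to_detections_py_spec : Claim_equal_match_tracks_to_detections_py := by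
  intro predictions detections g _ _
  unfold Spec_match_tracks_to_detections_py match_tracks_to_detections_py match_tracks_to_detections_py_alt
  have hG := pv_main g predictions detections predictions.length ([], [], [])
    (le_of_eq (pv_mu_nil predictions))
  by_cases hp : predictions = []
  · subst hp
    rw [if_pos rfl]
    simp only [List.length_nil]
    show _ = ((pvLoopB g [] detections 0 ([], [], [])).2.2, _, _)
    simp only [pvLoopB]
    rw [pv_filter_nil_set, pv_filter_nil_set]
    rfl
  · rw [if_neg hp]
    by_cases hd : detections = []
    · subst hd
      rw [if_pos rfl]
      show _ = ((pvLoopB g predictions [] predictions.length ([], [], [])).2.2, _, _)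
      rw [← hG, pv_pairsA_nil_dets]
      show ([], predictions.map (·.1), []) = _
      show _ = ((([],[],[]) : PySem.Set Int × PySem.Set Int × List (Int × Int)).2.2,
        (predictions.map (·.1)).filter (fun t => !(PySem.Set.contains ([] : PySem.Set Int) t)),
        (PySem.List.pyRange 0 (0:Int) 1).filter (fun d => !(PySem.Set.contains ([] : PySem.Set Int) d)))
      rw [pv_filter_nil_set, PySem.List.pyRange_one_eq_nil le_rfl]
      rfl
    · rw [if_neg hd]
      show _ = ((pvLoopB g predictions detections predictions.length ([], [], [])).2.2, _, _)
      rw [← hG]
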